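-- pv_equiv track=rewrite | github.com/floating-reeds/gan-assignment-2 | main.py | find_rectangles
-- ===== SOURCE A (Python) =====
-- def find_rectangles(matrix):
--     rows, cols = len(matrix), len(matrix[0]) # rows in the matrix contribute to height, columns in the matrix are width, matrix display is done in reverse order
--     rectangles = []
--     for r in range(rows):
--         for c in range(cols):
--             if matrix[r][c] == 1:
--                 max_width = cols - c  #max width possible
--                 for w in range(max_width):
--                     if matrix[r][c + w] == 0:
--                         break
--                     max_height = rows - r  #max height possible
--                     for h in range(max_height):
--                         if any(matrix[r + h][c + i] == 0 for i in range(w + 1)):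
--                             break
--                         rectangles.append([r,c,h,w,(h+1)*(w+1)]) #positions, dimensions, area
--     return rectangles
-- ===== SOURCE B (Python) =====
-- def find_rectangles(matrix):
--     rows, cols = len(matrix), len(matrix[0])
--     # run[r][c] = number of consecutive non-zero entries in row r starting at column c
--     # (rectangles extend over any non-zero entry; they only *start* at an entry equal to 1)
--     run = []
--     for row in matrix:
--         rl = [0] * cols
--         nxt = 0
--         for c in range(cols - 1, -1, -1):
--             nxt = nxt + 1 if row[c] != 0 else 0
--             rl[c] = nxt
--         run.append(rl)
--     rectangles = []
--     for r in range(rows):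
--         for c in range(cols):
--             if matrix[r][c] == 1:
--                 # ms[h] = min run width over rows r..r+h (non-increasing, positive)
--                 ms = []
--                 m = run[r][c]
--                 for i in range(r, rows):
--                     v = run[i][c]
--                     if v == 0:
--                         break
--                     if v < m:
--                         m = v
--                     ms.append(m)
--                 count = len(ms)
--                 for w in range(ms[0]):
--                     while ms[count - 1] < w + 1:
--                         count -= 1
--                     for h in range(count):
--                         rectangles.append([r, c, h, w, (h + 1) * (w + 1)])
--     return rectangles
-- ===== Notes on version B (the rewrite author's own statement) =====
-- stated objective: faster
-- what changed: B precomputes per-row right-run lengths of consecutive non-zero entries once, then per rectangle top-left corner builds the non-increasing list of min-run widths going down and emits rectangles with a two-pointer count per width, replacing A's re-scan of the whole rectangle window (any(...) over the row segment for every height) with O(1) work per emitted rectangle.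
import Mathlib
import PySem

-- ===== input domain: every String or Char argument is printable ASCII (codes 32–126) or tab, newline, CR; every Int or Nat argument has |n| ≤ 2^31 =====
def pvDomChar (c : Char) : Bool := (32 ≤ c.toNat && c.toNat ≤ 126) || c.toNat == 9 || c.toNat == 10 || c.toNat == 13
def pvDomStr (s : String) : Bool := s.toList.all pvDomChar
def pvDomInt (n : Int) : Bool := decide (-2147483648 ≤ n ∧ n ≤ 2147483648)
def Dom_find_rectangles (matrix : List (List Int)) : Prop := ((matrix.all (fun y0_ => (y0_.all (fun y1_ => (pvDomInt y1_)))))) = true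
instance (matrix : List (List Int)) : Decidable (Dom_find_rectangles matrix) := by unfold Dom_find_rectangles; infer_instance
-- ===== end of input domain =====

-- B replaces A's per-rectangle window re-scan by precomputed right-run lengths plus a per-corner
-- min-run list with a two-pointer count, emitting each rectangle in O(1) (objective: faster, measured).

-- ===== PORT A =====
-- matrix[r][c] (always in range under Pre_; default 0 otherwise)
def pvGetE (matrix : List (List Int)) (r c : Nat) : Int := (matrix.getD r []).getD c 0

-- inner `for h in range(max_height)` with its break
def pvAH (matrix : List (List Int)) (r c w : Nat) : List Nat → List (List Int)
  | [] => []
  | h :: rest =>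
    if (List.range (w + 1)).any (fun i => pvGetE matrix (r + h) (c + i) == 0) then []
    else [(r : Int), (c : Int), (h : Int), (w : Int), ((h : Int) + 1) * ((w : Int) + 1)]
         :: pvAH matrix r c w rest

-- `for w in range(max_width)` with its break
def pvAW (matrix : List (List Int)) (r c rows : Nat) : List Nat → List (List Int)
  | [] => []
  | w :: rest =>
    if pvGetE matrix r (c + w) == 0 then []
    else pvAH matrix r c w (List.range (rows - r)) ++ pvAW matrix r c rows rest

def find_rectangles (matrix : List (List Int)) : List (List Int) :=
  let rows := matrix.length
  let cols := (matrix.getD 0 []).length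
  (List.range rows).flatMap (fun r =>
    (List.range cols).flatMap (fun c =>
      if pvGetE matrix r c == 1 then pvAW matrix r c rows (List.range (cols - c)) else []))

-- ===== PORT B =====
-- `for c in range(cols-1, -1, -1): nxt = nxt+1 if row[c] != 0 else 0; rl[c] = nxt`
def pvRunRow (row : List Int) : Nat → Int → List Int → List Int
  | 0, _, acc => acc
  | k + 1, nxt, acc =>
    let v : Int := if row.getD k 0 != 0 then nxt + 1 else 0
    pvRunRow row k v (v :: acc)

-- `for i in range(r, rows): v = run[i][c]; if v == 0: break; if v < m: m = v; ms.append(m)`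
def pvMs (run : List (List Int)) (c : Nat) : Int → List Nat → List Int
  | _, [] => []
  | m, i :: rest =>
    let v := pvGetE run i c
    if v == 0 then []
    else
      let m' := if v < m then v else m
      m' :: pvMs run c m' rest

-- `while ms[count-1] < w+1: count -= 1`
def pvShrink (ms : List Int) (t : Int) : Nat → Nat
  | 0 => 0
  | k + 1 => if ms.getD k 0 < t then pvShrink ms t k else k + 1

-- `for w in range(ms[0]): ...; for h in range(count): append`
def pvEmitW (r c : Nat) (ms : List Int) : Nat → List Nat → List (List Int)
  | _, [] => []
  | count, w :: rest =>
    let cnt := pvShrink ms ((w : Int) + 1) count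
    ((List.range cnt).map (fun (h : Nat) =>
        [(r : Int), (c : Int), (h : Int), (w : Int), ((h : Int) + 1) * ((w : Int) + 1)]))
      ++ pvEmitW r c ms cnt rest

def find_rectangles_alt (matrix : List (List Int)) : List (List Int) :=
  let rows := matrix.length
  let cols := (matrix.getD 0 []).length
  let run := matrix.map (fun row => pvRunRow row cols 0 [])
  (List.range rows).flatMap (fun r =>
    (List.range cols).flatMap (fun c =>
      if pvGetE matrix r c == 1 then
        let ms := pvMs run c (pvGetE run r c) (List.range' r (rows - r))
        pvEmitW r c ms ms.length (List.range (ms.getD 0 0).toNat)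
      else []))

-- ===== PRECONDITION & SPEC =====
-- A raises IndexError on the empty matrix (matrix[0]) and whenever some row is shorter than the
-- first row (the guard matrix[r][c] touches every cell with c < len(matrix[0])); excluded here.
def Pre_find_rectangles (matrix : List (List Int)) : Prop :=
  matrix ≠ [] ∧ ∀ row ∈ matrix, (matrix.headD []).length ≤ row.length
instance (matrix : List (List Int)) : Decidable (Pre_find_rectangles matrix) := by
  unfold Pre_find_rectangles; infer_instance

def pvWitness_find_rectangles : List (List Int) := [[1, 1, 0], [1, 1, 1], [0, 2, 1]]

def Spec_find_rectangles (matrix : List (List Int)) (out : List (List Int)) : Prop :=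
  out = find_rectangles_alt matrix
instance (matrix : List (List Int)) (out : List (List Int)) : Decidable (Spec_find_rectangles matrix out) := by
  unfold Spec_find_rectangles; infer_instance

-- ===== CLAIM (what is proved, stated in full; the proofs are below) =====
def Claim_equal_find_rectangles : Prop := ∀ (matrix : List (List Int)), Dom_find_rectangles matrix → Pre_find_rectangles matrix → Spec_find_rectangles matrix (find_rectangles matrix)

-- ===== LEMMAS AND PROOFS =====

-- run length of consecutive non-zero entries of `row` starting at c, with fuel f
def pvRowRun (row : List Int) : Nat → Nat → Int
  | _, 0 => 0
  | c, f + 1 => if row.getD c 0 ≠ 0 then pvRowRun row (c + 1) f + 1 else 0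

def pvRn (matrix : List (List Int)) (cols r c : Nat) : Int :=
  pvRowRun (matrix.getD r []) c (cols - c)

-- number of consecutive rows from i (fuel n) whose run at column c is ≥ t
def pvHcnt (matrix : List (List Int)) (cols c : Nat) (t : Int) : Nat → Nat → Nat
  | _, 0 => 0
  | i, n + 1 => if t ≤ pvRn matrix cols i c then pvHcnt matrix cols c t (i + 1) n + 1 else 0

def pvBody (r c w : Nat) : Nat → List Int := fun h =>
  [(r : Int), (c : Int), (h : Int), (w : Int), ((h : Int) + 1) * ((w : Int) + 1)]

theorem pvRowRun_nonneg (row : List Int) (c f : Nat) : 0 ≤ pvRowRun row c f := by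
  induction f generalizing c with
  | zero => simp [pvRowRun]
  | succ f ih =>
    simp only [pvRowRun]
    split
    · have := ih (c + 1); omega
    · omega

theorem pvRowRun_le_fuel (row : List Int) (c f : Nat) : pvRowRun row c f ≤ (f : Int) := by
  induction f generalizing c with
  | zero => simp [pvRowRun]
  | succ f ih =>
    simp only [pvRowRun]
    split
    · have := ih (c + 1); push_cast; omega
    · push_cast; omega

theorem pvRowRun_ge_iff (row : List Int) (t : Nat) : ∀ c f, t ≤ f →
    ((t : Int) ≤ pvRowRun row c f ↔ ∀ i < t, row.getD (c + i) 0 ≠ 0) := by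
  induction t with
  | zero =>
    intro c f _
    simp [pvRowRun_nonneg]
  | succ t ih =>
    intro c f htf
    match f, htf with
    | f + 1, htf =>
      simp only [pvRowRun]
      by_cases h0 : row.getD c 0 ≠ 0
      · rw [if_pos h0]
        have hrec := ih (c + 1) f (by omega)
        constructor
        · intro hle i hi
          match i with
          | 0 => simpa using h0
          | i + 1 =>
            have : (t : Int) ≤ pvRowRun row (c + 1) f := by push_cast at hle ⊢; omega
            have := (hrec.mp this) i (by omega)
            simpa [Nat.add_comm, Nat.add_assoc, Nat.add_left_comm] using this
        · intro hall
          have : ∀ i < t, row.getD (c + 1 + i) 0 ≠ 0 := by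
            intro i hi
            have := hall (i + 1) (by omega)
            simpa [Nat.add_comm, Nat.add_assoc, Nat.add_left_comm] using this
          have := hrec.mpr this
          push_cast; omega
      · rw [if_neg h0]
        push Not at h0
        constructor
        · intro hle; exfalso; push_cast at hle; omega
        · intro hall
          exact absurd h0 (by simpa using hall 0 (by omega))

theorem pvRowRun_first_zero (row : List Int) : ∀ f c, pvRowRun row c f < (f : Int) →
    row.getD (c + (pvRowRun row c f).toNat) 0 = 0 := by
  intro f
  induction f with
  | zero => intro c h; simp [pvRowRun] at h
  | succ f ih =>
    intro c h
    simp only [pvRowRun] at h ⊢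
    by_cases h0 : row.getD c 0 ≠ 0
    · rw [if_pos h0] at h ⊢
      have hn := pvRowRun_nonneg row (c + 1) f
      have hlt : pvRowRun row (c + 1) f < (f : Int) := by push_cast at h; omega
      have := ih (c + 1) hlt
      have htn : (pvRowRun row (c + 1) f + 1).toNat = (pvRowRun row (c + 1) f).toNat + 1 := by omega
      rw [htn]
      calc row.getD (c + ((pvRowRun row (c + 1) f).toNat + 1)) 0
          = row.getD (c + 1 + (pvRowRun row (c + 1) f).toNat) 0 := by ring_nf
        _ = 0 := this
    · rw [if_neg h0] at h ⊢
      push Not at h0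
      simpa using h0

theorem pvAny_window (matrix : List (List Int)) (cols r' c w : Nat) (hw : w < cols - c) :
    ((List.range (w + 1)).any (fun i => pvGetE matrix r' (c + i) == 0) = false)
      ↔ ((w : Int) + 1 ≤ pvRn matrix cols r' c) := by
  rw [List.any_eq_false]
  simp only [List.mem_range, pvGetE, beq_iff_eq]
  have h := pvRowRun_ge_iff (matrix.getD r' []) (w + 1) c (cols - c) (by omega)
  rw [pvRn]
  push_cast at h
  constructor
  · intro hall
    exact h.mpr (fun i hi => hall i hi)
  · intro hle i hi
    exact h.mp hle i hi

theorem pvHcnt_le_fuel (matrix : List (List Int)) (cols c : Nat) (t : Int) :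
    ∀ n i, pvHcnt matrix cols c t i n ≤ n := by
  intro n
  induction n with
  | zero => intro i; simp [pvHcnt]
  | succ n ih =>
    intro i
    simp only [pvHcnt]
    split
    · have := ih (i + 1); omega
    · omega

theorem pvHcnt_succ_iff (matrix : List (List Int)) (cols c : Nat) (t : Int) :
    ∀ a n i, a ≤ pvHcnt matrix cols c t i n →
      (a < pvHcnt matrix cols c t i n ↔ a < n ∧ t ≤ pvRn matrix cols (i + a) c) := by
  intro a
  induction a with
  | zero =>
    intro n i h0
    match n with
    | 0 => simp [pvHcnt]
    | n + 1 =>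
      by_cases ht : t ≤ pvRn matrix cols i c
      · simp [pvHcnt, ht]
      · simp [pvHcnt, ht]
  | succ a ih =>
    intro n i h
    match n with
    | 0 => simp [pvHcnt] at h
    | n + 1 =>
      simp only [pvHcnt] at h ⊢
      by_cases ht : t ≤ pvRn matrix cols i c
      · rw [if_pos ht] at h ⊢
        have := ih n (i + 1) (by omega)
        constructor
        · intro hlt
          have := this.mp (by omega)
          refine ⟨by omega, ?_⟩
          have harith : i + 1 + a = i + (a + 1) := by omega
          rw [harith] at this; exact this.2
        · intro ⟨hn, hrn⟩
          have harith : i + 1 + a = i + (a + 1) := by omega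
          have := this.mpr ⟨by omega, by rw [harith]; exact hrn⟩
          omega
      · rw [if_neg ht] at h; omega

theorem pvAH_eq (matrix : List (List Int)) (cols r c w : Nat) (hw : w < cols - c)
    (rows : Nat) :
    ∀ n a, a + n = rows - r → a ≤ pvHcnt matrix cols c ((w : Int) + 1) r (rows - r) →
      pvAH matrix r c w (List.range' a n)
        = (List.range' a (pvHcnt matrix cols c ((w : Int) + 1) r (rows - r) - a)).map (pvBody r c w) := by
  intro n
  induction n with
  | zero =>
    intro a ha hK
    have hle := pvHcnt_le_fuel matrix cols c ((w : Int) + 1) (rows - r) r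
    have : pvHcnt matrix cols c ((w : Int) + 1) r (rows - r) - a = 0 := by omega
    simp [this, pvAH]
  | succ n ih =>
    intro a ha hK
    set K := pvHcnt matrix cols c ((w : Int) + 1) r (rows - r) with hKdef
    have hiff := pvHcnt_succ_iff matrix cols c ((w : Int) + 1) a (rows - r) r hK
    rw [List.range'_succ]
    rcases Nat.eq_or_lt_of_le hK with heq | hlt
    · -- a = K : the break fires
      have haN : a < rows - r := by omega
      have hRnNeg : ¬ ((w : Int) + 1 ≤ pvRn matrix cols (r + a) c) := by
        intro hRn
        have : a < K := hiff.mpr ⟨haN, hRn⟩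
        omega
      have hany : ((List.range (w + 1)).any (fun i => pvGetE matrix (r + a) (c + i) == 0)) = true := by
        cases hb : ((List.range (w + 1)).any (fun i => pvGetE matrix (r + a) (c + i) == 0)) with
        | false => exact absurd ((pvAny_window matrix cols (r + a) c w hw).mp hb) hRnNeg
        | true => rfl
      have hKa : K - a = 0 := by omega
      simp [pvAH, hany, hKa]
    · -- a < K : emit and continue
      obtain ⟨haN, hRn⟩ := hiff.mp hlt
      have hany : ((List.range (w + 1)).any (fun i => pvGetE matrix (r + a) (c + i) == 0)) = false :=
        (pvAny_window matrix cols (r + a) c w hw).mpr hRn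
      have hstep : K - a = (K - (a + 1)) + 1 := by omega
      rw [hstep, List.range'_succ]
      simp only [pvAH, hany, Bool.false_eq_true, if_false, List.map_cons]
      rw [ih (a + 1) (by omega) (by omega)]
      rfl

theorem pvAW_eq (matrix : List (List Int)) (cols r c rows : Nat) :
    ∀ n a, a + n = cols - c → a ≤ (pvRn matrix cols r c).toNat →
      pvAW matrix r c rows (List.range' a n)
        = (List.range' a ((pvRn matrix cols r c).toNat - a)).flatMap
            (fun w => pvAH matrix r c w (List.range (rows - r))) := by
  intro n
  induction n with
  | zero =>
    intro a ha hK
    have hle := pvRowRun_le_fuel (matrix.getD r []) c (cols - c)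
    have hnn := pvRowRun_nonneg (matrix.getD r []) c (cols - c)
    have h0 : (pvRn matrix cols r c).toNat - a = 0 := by
      simp only [pvRn]; omega
    simp [h0, pvAW]
  | succ n ih =>
    intro a ha hK
    have hnn := pvRowRun_nonneg (matrix.getD r []) c (cols - c)
    have hle := pvRowRun_le_fuel (matrix.getD r []) c (cols - c)
    have hKint : (((pvRn matrix cols r c).toNat : Int)) = pvRowRun (matrix.getD r []) c (cols - c) := by
      simp only [pvRn]; omega
    rw [List.range'_succ]
    rcases Nat.eq_or_lt_of_le hK with heq | hlt
    · -- a = K : first zero, break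
      have haN : a < cols - c := by omega
      have hRnval : pvRowRun (matrix.getD r []) c (cols - c) = (a : Int) := by omega
      have hz : (matrix.getD r []).getD (c + a) 0 = 0 := by
        have hlt' : pvRowRun (matrix.getD r []) c (cols - c) < ((cols - c : Nat) : Int) := by
          rw [hRnval]; exact_mod_cast haN
        have h2 := pvRowRun_first_zero (matrix.getD r []) (cols - c) c hlt'
        rw [hRnval] at h2
        simpa using h2
      have hcond : (pvGetE matrix r (c + a) == 0) = true := by
        unfold pvGetE; rw [hz]; rfl
      have hKa : (pvRn matrix cols r c).toNat - a = 0 := by omega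
      simp [pvAW, hcond, hKa]
    · -- a < K : continue
      have haN : a < cols - c := by omega
      have hnz : (matrix.getD r []).getD (c + a) 0 ≠ 0 := by
        have h := pvRowRun_ge_iff (matrix.getD r []) (a + 1) c (cols - c) (by omega)
        push_cast at h
        exact h.mp (by omega) a (by omega)
      have hcond : (pvGetE matrix r (c + a) == 0) = false := by
        unfold pvGetE; simpa using hnz
      have hstep : (pvRn matrix cols r c).toNat - a = ((pvRn matrix cols r c).toNat - (a + 1)) + 1 := by
        omega
      rw [hstep, List.range'_succ]
      simp only [pvAW, hcond, Bool.false_eq_true, if_false, List.flatMap_cons]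
      rw [ih (a + 1) (by omega) (by omega)]

theorem pvFlatMap_congr {α β : Type} (l : List α) (f g : α → List β)
    (h : ∀ x ∈ l, f x = g x) : l.flatMap f = l.flatMap g := by
  induction l with
  | nil => rfl
  | cons x xs ih =>
    simp only [List.flatMap_cons]
    rw [h x (by simp), ih (fun y hy => h y (by simp [hy]))]

theorem pvA_cell (matrix : List (List Int)) (cols r c rows : Nat) :
    pvAW matrix r c rows (List.range (cols - c))
      = (List.range' 0 (pvRn matrix cols r c).toNat).flatMap
          (fun (w : Nat) => (List.range' 0 (pvHcnt matrix cols c ((w : Int) + 1) r (rows - r))).map (pvBody r c w)) := by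
  have hKle : (pvRn matrix cols r c).toNat ≤ cols - c := by
    have := pvRowRun_le_fuel (matrix.getD r []) c (cols - c)
    have := pvRowRun_nonneg (matrix.getD r []) c (cols - c)
    simp only [pvRn]; omega
  rw [List.range_eq_range', pvAW_eq matrix cols r c rows (cols - c) 0 (by omega) (by omega)]
  simp only [Nat.sub_zero]
  apply pvFlatMap_congr
  intro w hw
  have hwK : w < (pvRn matrix cols r c).toNat := by
    have := List.mem_range'_1.mp hw; omega
  rw [List.range_eq_range', pvAH_eq matrix cols r c w (by omega) rows (rows - r) 0 (by omega) (by omega)]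
  simp

-- ===== B-side lemmas =====

theorem pvRunRow_eq (row : List Int) (cols : Nat) :
    ∀ k, k ≤ cols → ∀ acc, pvRunRow row k (pvRowRun row k (cols - k)) acc
      = ((List.range k).map (fun c => pvRowRun row c (cols - c))) ++ acc := by
  intro k
  induction k with
  | zero => intro _ acc; simp [pvRunRow]
  | succ k ih =>
    intro hk acc
    have hfuel : cols - k = (cols - (k + 1)) + 1 := by omega
    have hv : (if (List.getD row k 0) != 0 then pvRowRun row (k + 1) (cols - (k + 1)) + 1 else 0)
        = pvRowRun row k (cols - k) := by
      rw [hfuel]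
      by_cases h0 : List.getD row k 0 = 0
      · simp [pvRowRun, h0]
      · simp [pvRowRun, h0]
    simp only [pvRunRow]
    rw [hv, ih (by omega) (pvRowRun row k (cols - k) :: acc)]
    rw [List.range_succ]
    simp

theorem pvRunTab_get (matrix : List (List Int)) (cols : Nat) (i c : Nat)
    (hi : i < matrix.length) (hc : c < cols) :
    pvGetE (matrix.map (fun row => pvRunRow row cols 0 [])) i c = pvRn matrix cols i c := by
  unfold pvGetE
  have hi' : i < (matrix.map (fun row => pvRunRow row cols 0 [])).length := by simpa using hi
  rw [List.getD_eq_getElem _ _ hi', List.getElem_map]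
  have hrow : matrix[i] = matrix.getD i [] := (List.getD_eq_getElem _ _ hi).symm
  rw [hrow]
  have h0 : (0 : Int) = pvRowRun (matrix.getD i []) cols (cols - cols) := by
    simp [pvRowRun]
  rw [h0, pvRunRow_eq (matrix.getD i []) cols cols (le_refl _) []]
  have hc' : c < (((List.range cols).map (fun c => pvRowRun (matrix.getD i []) c (cols - c))) ++ ([] : List Int)).length := by
    simpa using hc
  rw [List.getD_eq_getElem _ _ hc']
  simp [pvRn, hc]

theorem pvMs_mem_le (run : List (List Int)) (c : Nat) :
    ∀ l m x, x ∈ pvMs run c m l → x ≤ m := by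
  intro l
  induction l with
  | nil => intro m x hx; simp [pvMs] at hx
  | cons i rest ih =>
    intro m x hx
    simp only [pvMs] at hx
    by_cases hv : pvGetE run i c == 0
    · rw [if_pos hv] at hx; simp at hx
    · rw [if_neg hv] at hx
      simp only [List.mem_cons] at hx
      rcases hx with rfl | hx
      · split <;> omega
      · have := ih _ x hx
        split at this <;> omega

theorem pvMs_pairwise (run : List (List Int)) (c : Nat) :
    ∀ l m, (pvMs run c m l).Pairwise (fun a b => b ≤ a) := by
  intro l
  induction l with
  | nil => intro m; simp [pvMs]
  | cons i rest ih =>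
    intro m
    simp only [pvMs]
    by_cases hv : pvGetE run i c == 0
    · rw [if_pos hv]; simp
    · rw [if_neg hv]
      refine List.Pairwise.cons ?_ (ih _)
      intro y hy
      exact pvMs_mem_le run c rest _ y hy

theorem pvMs_takeWhile (matrix : List (List Int)) (cols c : Nat) (hc : c < cols) (t : Int)
    (ht : 1 ≤ t) :
    ∀ n i m, i + n = matrix.length →
      ((pvMs (matrix.map (fun row => pvRunRow row cols 0 [])) c m (List.range' i n)).takeWhile
          (fun x => decide (t ≤ x))).length
        = if t ≤ m then pvHcnt matrix cols c t i n else 0 := by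
  intro n
  induction n with
  | zero =>
    intro i m _
    simp [pvMs, pvHcnt]
  | succ n ih =>
    intro i m hin
    have hi : i < matrix.length := by omega
    rw [List.range'_succ]
    simp only [pvMs, pvHcnt]
    rw [pvRunTab_get matrix cols i c hi hc]
    have hnn : 0 ≤ pvRn matrix cols i c := pvRowRun_nonneg _ _ _
    by_cases hv : pvRn matrix cols i c = 0
    · have h1 : ¬ (t ≤ pvRn matrix cols i c) := by omega
      simp [hv, h1]
      intro _
      omega
    · have hv' : (pvRn matrix cols i c == 0) = false := by simpa using hv
      rw [hv', if_neg (by simp)]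
      set m' : Int := if pvRn matrix cols i c < m then pvRn matrix cols i c else m with hm'
      have hiff : (t ≤ m') ↔ (t ≤ m ∧ t ≤ pvRn matrix cols i c) := by
        rw [hm']; split <;> omega
      by_cases htm : t ≤ m'
      · obtain ⟨h1, h2⟩ := hiff.mp htm
        rw [List.takeWhile_cons, if_pos (by simpa using htm)]
        simp only [List.length_cons]
        rw [ih (i + 1) m' (by omega), if_pos htm, if_pos h1, if_pos h2]
      · rw [List.takeWhile_cons, if_neg (by simpa using htm)]
        have : ¬ (t ≤ m ∧ t ≤ pvRn matrix cols i c) := fun h => htm (hiff.mpr h)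
        simp only [List.length_nil]
        by_cases h1 : t ≤ m
        · have h2 : ¬ t ≤ pvRn matrix cols i c := by tauto
          rw [if_pos h1, if_neg h2]
        · rw [if_neg h1]

theorem pvTW_le_length {α : Type} (p : α → Bool) (l : List α) :
    (l.takeWhile p).length ≤ l.length := by
  induction l with
  | nil => simp
  | cons x xs ih =>
    simp only [List.takeWhile]
    split <;> simp <;> omega

theorem pvTW_getD (p : Int → Bool) : ∀ (l : List Int) (j : Nat),
    j < (l.takeWhile p).length → p (l.getD j 0) = true := by
  intro l
  induction l with
  | nil => simp
  | cons x xs ih =>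
    intro j hj
    simp only [List.takeWhile] at hj
    by_cases hx : p x
    · rw [hx] at hj
      simp at hj
      match j with
      | 0 => simpa using hx
      | j + 1 =>
        have := ih j (by simpa using hj)
        simpa using this
    · simp [hx] at hj

theorem pvTW_ge (p : Int → Bool) : ∀ (l : List Int) (n : Nat), n ≤ l.length →
    (∀ j, j < n → p (l.getD j 0) = true) → n ≤ (l.takeWhile p).length := by
  intro l
  induction l with
  | nil => intro n h _; simpa using h
  | cons x xs ih =>
    intro n hn hall
    match n with
    | 0 => omega
    | n + 1 =>
      have hx : p x = true := by simpa using hall 0 (by omega)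
      simp only [List.takeWhile, hx]
      have := ih n (by simpa using hn) (fun j hj => by simpa using hall (j + 1) (by omega))
      simpa using this

theorem pvPair_getD (l : List Int) (hp : l.Pairwise (fun a b => b ≤ a)) :
    ∀ j k, j ≤ k → k < l.length → l.getD k 0 ≤ l.getD j 0 := by
  intro j k hjk hk
  rcases Nat.eq_or_lt_of_le hjk with rfl | hlt
  · exact le_refl _
  · have hj : j < l.length := by omega
    rw [l.getD_eq_getElem 0 hk, l.getD_eq_getElem 0 hj]
    exact (List.pairwise_iff_getElem.mp hp) j k hj hk hlt

theorem pvShrink_eq (ms : List Int) (hp : ms.Pairwise (fun a b => b ≤ a)) (t : Int) :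
    ∀ count, (ms.takeWhile (fun x => decide (t ≤ x))).length ≤ count → count ≤ ms.length →
      pvShrink ms t count = (ms.takeWhile (fun x => decide (t ≤ x))).length := by
  intro count
  induction count with
  | zero =>
    intro hle _
    simp only [pvShrink]
    omega
  | succ k ih =>
    intro hle hlen
    by_cases hk : ms.getD k 0 < t
    · rw [pvShrink, if_pos hk]
      apply ih _ (by omega)
      by_contra hgt
      have hklt : k < (ms.takeWhile (fun x => decide (t ≤ x))).length := by omega
      have := pvTW_getD (fun x => decide (t ≤ x)) ms k hklt
      simp at this
      simp only [List.getD] at hk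
      omega
    · rw [pvShrink, if_neg hk]
      have hge : k + 1 ≤ (ms.takeWhile (fun x => decide (t ≤ x))).length := by
        apply pvTW_ge _ _ _ hlen
        intro j hj
        have hjk : ms.getD k 0 ≤ ms.getD j 0 := pvPair_getD ms hp j k (by omega) (by omega)
        simp only [List.getD] at hjk hk
        simp
        omega
      omega

theorem pvCnt_mono (ms : List Int) (t t' : Int) (h : t ≤ t') :
    (ms.takeWhile (fun x => decide (t' ≤ x))).length ≤ (ms.takeWhile (fun x => decide (t ≤ x))).length := by
  apply pvTW_ge
  · exact pvTW_le_length _ _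
  · intro j hj
    have := pvTW_getD (fun x => decide (t' ≤ x)) ms j hj
    simp at this ⊢
    omega

theorem pvEmitW_eq (r c : Nat) (ms : List Int) (hp : ms.Pairwise (fun a b => b ≤ a)) :
    ∀ (n a count : Nat),
      (ms.takeWhile (fun x => decide ((a : Int) + 1 ≤ x))).length ≤ count → count ≤ ms.length →
      pvEmitW r c ms count (List.range' a n)
        = (List.range' a n).flatMap (fun (w : Nat) =>
            (List.range ((ms.takeWhile (fun x => decide ((w : Int) + 1 ≤ x))).length)).map (pvBody r c w)) := by
  intro n
  induction n with
  | zero => intro a count _ _; simp [pvEmitW]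
  | succ n ih =>
    intro a count h1 h2
    rw [List.range'_succ]
    simp only [pvEmitW, List.flatMap_cons]
    rw [pvShrink_eq ms hp ((a : Int) + 1) count h1 h2]
    rw [ih (a + 1) _ (pvCnt_mono ms ((a : Int) + 1) (((a + 1 : Nat) : Int) + 1)
          (by push_cast; omega)) (pvTW_le_length _ _)]
    rfl


theorem pvB_cell (matrix : List (List Int)) (cols r c : Nat) (hr : r < matrix.length)
    (hc : c < cols) (he : (matrix.getD r []).getD c 0 = 1) :
    pvEmitW r c
        (pvMs (matrix.map (fun row => pvRunRow row cols 0 [])) c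
          (pvGetE (matrix.map (fun row => pvRunRow row cols 0 [])) r c)
          (List.range' r (matrix.length - r)))
        (pvMs (matrix.map (fun row => pvRunRow row cols 0 [])) c
          (pvGetE (matrix.map (fun row => pvRunRow row cols 0 [])) r c)
          (List.range' r (matrix.length - r))).length
        (List.range ((pvMs (matrix.map (fun row => pvRunRow row cols 0 [])) c
          (pvGetE (matrix.map (fun row => pvRunRow row cols 0 [])) r c)
          (List.range' r (matrix.length - r))).getD 0 0).toNat)
      = (List.range' 0 (pvRn matrix cols r c).toNat).flatMap
          (fun (w : Nat) => (List.range' 0 (pvHcnt matrix cols c ((w : Int) + 1) r (matrix.length - r))).map (pvBody r c w)) := by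
  set run := matrix.map (fun row => pvRunRow row cols 0 []) with hrun
  have hm0 : pvGetE run r c = pvRn matrix cols r c := pvRunTab_get matrix cols r c hr hc
  have hRn1 : (1 : Int) ≤ pvRn matrix cols r c := by
    have hfuel : cols - c = (cols - c - 1) + 1 := by omega
    have hnn := pvRowRun_nonneg (matrix.getD r []) (c + 1) (cols - c - 1)
    have hstep : pvRn matrix cols r c = pvRowRun (matrix.getD r []) c ((cols - c - 1) + 1) := by
      rw [pvRn, ← hfuel]
    rw [hstep]
    simp only [pvRowRun]
    rw [if_pos (by rw [he]; norm_num)]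
    omega
  have hsplit : matrix.length - r = (matrix.length - r - 1) + 1 := by omega
  have h0 : (pvRn matrix cols r c == 0) = false := beq_eq_false_iff_ne.mpr (by omega)
  have hmsEq : pvMs run c (pvGetE run r c) (List.range' r (matrix.length - r))
      = pvRn matrix cols r c
          :: pvMs run c (pvRn matrix cols r c) (List.range' (r + 1) (matrix.length - r - 1)) := by
    rw [hsplit, List.range'_succ]
    simp only [pvMs, hm0, h0, Bool.false_eq_true, if_false, ite_self, Nat.add_sub_cancel]
  have hp := pvMs_pairwise run c (List.range' r (matrix.length - r)) (pvGetE run r c)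
  rw [hmsEq] at hp
  rw [hmsEq]
  simp only [List.getD_cons_zero]
  rw [List.range_eq_range']
  rw [pvEmitW_eq r c _ hp ((pvRn matrix cols r c).toNat) 0 _ (pvTW_le_length _ _) (le_refl _)]
  apply pvFlatMap_congr
  intro w hw
  have hwK : w < (pvRn matrix cols r c).toNat := by
    have := List.mem_range'_1.mp hw; omega
  have htw := pvMs_takeWhile matrix cols c hc ((w : Int) + 1) (by omega)
      (matrix.length - r) r (pvGetE run r c) (by omega)
  rw [← hrun] at htw
  rw [← hmsEq, htw, hm0, if_pos (by omega), List.range_eq_range']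

-- ===== VERDICT (by name: the statement is the Claim_ definition above) =====
theorem find_rectangles_spec : Claim_equal_find_rectangles := by
  intro matrix _hdom _hpre
  unfold Spec_find_rectangles find_rectangles find_rectangles_alt
  apply pvFlatMap_congr
  intro r hr
  apply pvFlatMap_congr
  intro c hcm
  have hr' : r < matrix.length := List.mem_range.mp hr
  have hc' : c < (matrix.getD 0 []).length := List.mem_range.mp hcm
  by_cases hg : (pvGetE matrix r c == 1) = true
  · simp only [hg, if_true]
    have he : (matrix.getD r []).getD c 0 = 1 := by
      have h := hg; unfold pvGetE at h; exact eq_of_beq h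
    exact (pvA_cell matrix _ r c matrix.length).trans
      (pvB_cell matrix _ r c hr' hc' he).symm
  · rw [if_neg hg, if_neg hg]
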